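-- pv_equiv track=rewrite | github.com/exaforge/extropy | extropy/population/sampler/core.py | _coerce_minor_employment
-- ===== SOURCE A (Python) =====
-- from typing import Any, Literal
--
-- def _coerce_minor_employment(value: Any, age: int, options: list[str]) -> Any:
--     """Coerce employment to age-appropriate status for minors."""
--     if age >= 18:
--         return value
--
--     # Minors should be students or not employed
--     preferred = ["student", "none", "unemployed", "not_employed", "n/a"]
--     if age >= 16:
--         preferred = ["student", "part_time", "intern", "none", "unemployed"]
--
--     for pref in preferred:
--         for opt in options:
--             if pref in opt.lower():
--                 return opt
--
--     return options[0] if options else "student"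
-- ===== SOURCE B (Python) =====
-- def _coerce_minor_employment(value, age, options):
--     """Coerce employment to age-appropriate status for minors."""
--     if age >= 18:
--         return value
--
--     if age >= 16:
--         preferred = ["student", "part_time", "intern", "none", "unemployed"]
--     else:
--         preferred = ["student", "none", "unemployed", "not_employed", "n/a"]
--
--     if not options:
--         return "student"
--
--     def rank(opt):
--         low = opt.lower()
--         r = 0
--         for p in preferred:
--             if p in low:
--                 return r
--             r += 1
--         return r
--
--     # single left-to-right pass: first option with the smallest rank wins
--     best = options[0]
--     for opt in options[1:]:
--         if rank(opt) < rank(best):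
--             best = opt
--     return best
-- ===== Notes on version B (the rewrite author's own statement) =====
-- stated objective: alternative
-- what changed: Replaced the nested preferred-by-options scan with early return by a per-option rank function (index of the first preferred keyword contained in the lowered option) and a single left-to-right min-by-rank pass with first-wins tie-break.
import Mathlib
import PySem

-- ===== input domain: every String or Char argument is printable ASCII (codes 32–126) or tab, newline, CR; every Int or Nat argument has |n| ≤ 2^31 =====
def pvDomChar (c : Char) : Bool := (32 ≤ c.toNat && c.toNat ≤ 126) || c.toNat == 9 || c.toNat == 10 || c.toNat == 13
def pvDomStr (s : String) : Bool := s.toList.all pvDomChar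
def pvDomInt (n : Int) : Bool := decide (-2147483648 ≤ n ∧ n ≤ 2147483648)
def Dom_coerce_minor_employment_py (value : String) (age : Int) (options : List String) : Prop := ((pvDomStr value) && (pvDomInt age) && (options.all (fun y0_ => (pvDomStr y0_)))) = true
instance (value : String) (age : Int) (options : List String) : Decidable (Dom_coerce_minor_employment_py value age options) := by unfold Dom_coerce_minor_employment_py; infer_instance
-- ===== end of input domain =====

-- B replaces A's nested preferred×options scan with a per-option rank plus one min-by-rank pass (alternative decomposition, same cost).

-- ===== PORT A =====
-- 'pref in opt.lower()'
def pvMatch (p o : String) : Bool := PySem.Str.isIn p (PySem.Str.lower o)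

-- the nested 'for pref: for opt: if …: return opt' loops
def coerceSearch : List String → List String → Option String
  | [], _ => none
  | p :: ps, opts =>
    match opts.find? (fun o => pvMatch p o) with
    | some o => some o
    | none => coerceSearch ps opts

def coerce_minor_employment_py (value : String) (age : Int) (options : List String) : String :=
  if age ≥ 18 then value
  else
    let preferred := ["student", "none", "unemployed", "not_employed", "n/a"]
    let preferred := if age ≥ 16 then ["student", "part_time", "intern", "none", "unemployed"] else preferred
    match coerceSearch preferred options with
    | some o => o
    | none => match options with | [] => "student" | o :: _ => o

-- ===== PORT B =====
-- rank(opt): index of the first preferred keyword contained in the lowered option (length if none)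
def pvRankAux (low : String) : List String → Nat
  | [] => 0
  | p :: ps => if PySem.Str.isIn p low then 0 else pvRankAux low ps + 1

def pvRank (preferred : List String) (opt : String) : Nat :=
  pvRankAux (PySem.Str.lower opt) preferred

-- the single min-by-rank pass (first-wins tie-break)
def pvMinBy (f : String → Nat) (best : String) : List String → String
  | [] => best
  | o :: os => if f o < f best then pvMinBy f o os else pvMinBy f best os

def coerce_minor_employment_py_alt (value : String) (age : Int) (options : List String) : String :=
  if age ≥ 18 then value
  else
    let preferred := if age ≥ 16 then ["student", "part_time", "intern", "none", "unemployed"]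
                     else ["student", "none", "unemployed", "not_employed", "n/a"]
    match options with
    | [] => "student"
    | h :: t => pvMinBy (pvRank preferred) h t

-- ===== PRECONDITION & SPEC =====
def Spec_coerce_minor_employment_py (value : String) (age : Int) (options : List String) (out : String) : Prop := out = coerce_minor_employment_py_alt value age options
instance (value : String) (age : Int) (options : List String) (out : String) : Decidable (Spec_coerce_minor_employment_py value age options out) := by unfold Spec_coerce_minor_employment_py; infer_instance

-- ===== CLAIM (what is proved, stated in full; the proofs are below) =====
def Claim_equal_coerce_minor_employment_py : Prop := ∀ (value : String) (age : Int) (options : List String), Dom_coerce_minor_employment_py value age options → Spec_coerce_minor_employment_py value age options (coerce_minor_employment_py value age options)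

-- ===== LEMMAS AND PROOFS =====

theorem pvMinBy_of_not_lt (f : String → Nat) (best : String) (l : List String)
    (h : ∀ x ∈ l, ¬ f x < f best) : pvMinBy f best l = best := by
  induction l with
  | nil => rfl
  | cons x xs ih =>
    have hx : ¬ f x < f best := h x (by simp)
    simp only [pvMinBy, if_neg hx]
    exact ih (fun y hy => h y (by simp [hy]))

theorem pvMinBy_shift (f g : String → Nat) (best : String) (l : List String)
    (h : ∀ x ∈ best :: l, f x = g x + 1) : pvMinBy f best l = pvMinBy g best l := by
  induction l generalizing best with
  | nil => rfl
  | cons o os ih =>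
    have ho : f o = g o + 1 := h o (by simp)
    have hb : f best = g best + 1 := h best (by simp)
    simp only [pvMinBy, ho, hb, Nat.add_lt_add_iff_right]
    split
    · exact ih o (fun y hy => h y (List.mem_cons_of_mem _ hy))
    · refine ih best (fun y hy => h y ?_)
      rcases List.mem_cons.mp hy with hy | hy
      · simp [hy]
      · exact List.mem_cons_of_mem _ (List.mem_cons_of_mem _ hy)

theorem pvMinBy_first_zero (f : String → Nat) (l : List String) (best o : String)
    (h : (best :: l).find? (fun x => f x == 0) = some o) : pvMinBy f best l = o := by
  induction l generalizing best with
  | nil =>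
    by_cases hb : f best = 0
    · rw [List.find?_cons_of_pos (by simpa using hb)] at h
      simp only [Option.some.injEq] at h
      simp [pvMinBy, h]
    · rw [List.find?_cons_of_neg (by simpa using hb)] at h
      simp at h
  | cons x xs ih =>
    by_cases hb : f best = 0
    · rw [List.find?_cons_of_pos (by simpa using hb)] at h
      simp only [Option.some.injEq] at h
      rw [← h]
      exact pvMinBy_of_not_lt f best (x :: xs) (fun y _ => by omega)
    · rw [List.find?_cons_of_neg (by simpa using hb)] at h
      simp only [pvMinBy]
      split
      · exact ih x h
      · rename_i hlt
        have hx0 : ¬ f x = 0 := by omega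
        rw [List.find?_cons_of_neg (by simpa using hx0)] at h
        refine ih best ?_
        rw [List.find?_cons_of_neg (by simpa using hb)]
        exact h

theorem pvRank_cons_eq_match (p : String) (ps : List String) (x : String) :
    (pvRank (p :: ps) x == 0) = pvMatch p x := by
  simp only [pvRank, pvRankAux, pvMatch]
  cases PySem.Str.isIn p (PySem.Str.lower x) <;> simp

theorem coerce_main (prefs : List String) (best : String) (opts : List String) :
    (match coerceSearch prefs (best :: opts) with
      | some o => o
      | none => best) = pvMinBy (pvRank prefs) best opts := by
  induction prefs with
  | nil =>
    simp only [coerceSearch]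
    exact (pvMinBy_of_not_lt _ best opts (fun y _ => by simp [pvRank, pvRankAux])).symm
  | cons p ps ih =>
    cases h : (best :: opts).find? (fun o => pvMatch p o) with
    | some o =>
      simp only [coerceSearch, h]
      have hz : (best :: opts).find? (fun x => pvRank (p :: ps) x == 0) = some o := by
        have : (fun x => pvRank (p :: ps) x == 0) = (fun o => pvMatch p o) := by
          funext x; exact pvRank_cons_eq_match p ps x
        rw [this]; exact h
      exact (pvMinBy_first_zero _ opts best o hz).symm
    | none =>
      simp only [coerceSearch, h]
      have hnone := List.find?_eq_none.mp h
      have hshift : ∀ x ∈ best :: opts, pvRank (p :: ps) x = pvRank ps x + 1 := by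
        intro x hx
        have : pvMatch p x = false := by
          have := hnone x hx; simpa using this
        simp [pvRank, pvRankAux, pvMatch] at this ⊢
        simp [this]
      rw [pvMinBy_shift (pvRank (p :: ps)) (pvRank ps) best opts hshift]
      exact ih

theorem coerceSearch_nil (prefs : List String) : coerceSearch prefs [] = none := by
  induction prefs with
  | nil => rfl
  | cons p ps ih => simpa [coerceSearch, List.find?] using ih

-- ===== VERDICT (by name: the statement is the Claim_ definition above) =====
theorem coerce_minor_employment_py_spec : Claim_equal_coerce_minor_employment_py := by
  intro value age options _
  unfold Spec_coerce_minor_employment_py coerce_minor_employment_py coerce_minor_employment_py_alt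
  by_cases h18 : age ≥ 18
  · simp [h18]
  · simp only [if_neg h18]
    by_cases h16 : age ≥ 16 <;>
      simp only [h16, if_true, if_false] <;>
      cases options with
      | nil => simp [coerceSearch_nil]
      | cons h t => exact coerce_main _ h t
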